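-- pv_equiv track=rewrite | github.com/loning/mbook-binary | src/binaryuniverse/tests/test_T8_3.py | _angular_encoding
-- ===== SOURCE A (Python) =====
-- def _angular_encoding(info: str) -> str:
--     """角动量编码"""
--     # 使用循环移位模拟角动量
--     if len(info) < 4:
--         info = info.ljust(4, '0')
--
--     shifts = []
--     for i in range(min(len(info), 8)):
--         shifted = info[i:] + info[:i]
--         # 取特征位
--         shifts.append(shifted[0])
--
--     return ''.join(shifts)
-- ===== SOURCE B (Python) =====
-- def _angular_encoding(info: str) -> str:
--     """Angular-momentum encoding: closed form — pad to 4, then first min(len,8) chars."""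
--     if len(info) < 4:
--         info = info.ljust(4, '0')
--     return info[:min(len(info), 8)]
-- ===== Notes on version B (the rewrite author's own statement) =====
-- stated objective: simpler
-- what changed: Replaces the loop that builds each rotation info[i:]+info[:i] and collects its first character with the closed-form slice info[:min(len(info),8)], since the first char of the i-th rotation is info[i].
import Mathlib
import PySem

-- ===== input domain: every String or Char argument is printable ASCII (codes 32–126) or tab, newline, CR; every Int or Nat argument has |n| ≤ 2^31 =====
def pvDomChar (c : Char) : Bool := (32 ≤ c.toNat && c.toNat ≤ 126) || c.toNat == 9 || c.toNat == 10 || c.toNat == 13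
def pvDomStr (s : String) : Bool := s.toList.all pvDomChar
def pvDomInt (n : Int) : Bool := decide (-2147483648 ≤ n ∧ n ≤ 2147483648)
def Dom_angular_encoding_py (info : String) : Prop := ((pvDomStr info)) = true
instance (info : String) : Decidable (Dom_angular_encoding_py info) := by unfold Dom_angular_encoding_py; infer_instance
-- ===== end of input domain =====

-- B replaces A's rotation-building loop by the closed-form slice info[:min(len,8)] (simpler, same value).

-- ===== PORT A =====
-- '0'-pad on the right (str.ljust(4, '0')) — exact port: append the missing '0's.
def pvLjust4 (cs : List Char) : List Char := cs ++ List.replicate (4 - cs.length) '0'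

def angular_encoding_py (info : String) : String :=
  let cs := info.toList
  let cs := if cs.length < 4 then pvLjust4 cs else cs
  -- for i in range(min(len(info), 8)): shifted = info[i:] + info[:i]; shifts.append(shifted[0])
  -- shifted[0] can never raise here (cs has length ≥ 4), so the default of pyGetD is never used
  let shifts := (PySem.List.pyRange 0 (min cs.length 8 : Nat) 1).foldl
    (fun acc i =>
      let shifted := PySem.List.slice cs (some i) none ++ PySem.List.slice cs none (some i)
      acc ++ [PySem.List.pyGetD shifted 0 ' ']) []
  String.ofList shifts

-- ===== PORT B =====
def angular_encoding_py_alt (info : String) : String :=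
  let cs := info.toList
  let cs := if cs.length < 4 then pvLjust4 cs else cs
  String.ofList (cs.take (min cs.length 8))

-- ===== PRECONDITION & SPEC =====
def Spec_angular_encoding_py (info : String) (out : String) : Prop := out = angular_encoding_py_alt info
instance (info : String) (out : String) : Decidable (Spec_angular_encoding_py info out) := by unfold Spec_angular_encoding_py; infer_instance

-- ===== CLAIM (what is proved, stated in full; the proofs are below) =====
def Claim_equal_angular_encoding_py : Prop := ∀ (info : String), Dom_angular_encoding_py info → Spec_angular_encoding_py info (angular_encoding_py info)

-- ===== LEMMAS AND PROOFS =====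

-- first char of the i-th rotation is cs[i]
lemma pv_rot_head (cs : List Char) (i : Nat) (h : i < cs.length) :
    PySem.List.pyGetD (cs.drop i ++ cs.take i) 0 ' ' = cs[i] := by
  simp [PySem.List.pyGetD_zero, List.getD, h]

-- the collected first characters are exactly the first n characters
lemma pv_loop_eq_take (cs : List Char) (n : Nat) (hn : n ≤ cs.length) :
    (PySem.List.pyRange 0 (n : Nat) 1).foldl
      (fun acc i =>
        acc ++ [PySem.List.pyGetD (PySem.List.slice cs (some i) none ++ PySem.List.slice cs none (some i)) 0 ' ']) []
      = cs.take n := by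
  rw [show ((1 : Int)) = 1 from rfl]
  rw [PySem.List.pyRange_zero_nat, PySem.List.foldl_append_singleton_eq_map, List.map_map]
  apply List.ext_getElem
  · simp; omega
  · intro k hk hk'
    have hkn : k < n := by simpa using hk
    have hkc : k < cs.length := lt_of_lt_of_le hkn hn
    simp only [List.nil_append, List.getElem_map, List.getElem_range, Function.comp,
      PySem.List.slice_from_natCast, PySem.List.slice_to_natCast, List.getElem_take]
    exact pv_rot_head cs k hkc

-- ===== VERDICT (by name: the statement is the Claim_ definition above) =====
theorem angular_encoding_py_spec : Claim_equal_angular_encoding_py := by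
  intro info _
  unfold Spec_angular_encoding_py angular_encoding_py angular_encoding_py_alt
  set cs := if info.toList.length < 4 then pvLjust4 info.toList else info.toList with hcs
  have := pv_loop_eq_take cs (min cs.length 8) (Nat.min_le_left _ _)
  simp only at this ⊢
  rw [this]
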